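-- pv_equiv track=rewrite | github.com/Infrapink/calconv | callipic.py | nyd
-- ===== SOURCE A (Python) =====
-- epoch = 1601069
--
-- year_lengths = {0:  354,
--                 1:  355,
--                 2:  384,
--                 3:  354,
--                 4:  384,
--                 5:  354,
--                 6:  355,
--                 7:  384,
--                 8:  354,
--                 9:  355,
--                 10: 384,
--                 11: 354,
--                 12: 384,
--                 13: 354,
--                 14: 355,
--                 15: 384,
--                 16: 354,
--                 17: 354,
--                 18: 384}
--
-- def yl(year):
--     '''Compute the number of days in a year'''
--     year = int(year)
--     if (year > 0):
--         year -= 1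
--     if (year % 76 == 74):
--         ans = 354
--     else:
--         ans = year_lengths[year % 19]
--     return ans
--
-- def nyd(year):
--     '''Compute the Julian Day on which a given year begins'''
--     year = int(year)
--     if (year > 0):
--         year -= 1 # ancient Greeks did not recognise the number 0
--
--     y = 76 * (year // 76)
--     noumenia = epoch + (27759 * (year // 76))
--     while (y > year):
--         y -= 76
--         noumenia -= 27759
--     while (y + 76 <= year):
--         y += 76
--         noumenia += 27759
--     while (y + 19 <= year):
--         y += 19
--         noumenia += 6940
--     while (y < year):
--         if (y < 0):
--             noumenia += yl(y)
--             y += 1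
--         else:
--             y += 1
--             noumenia += yl(y)
--
--     return noumenia
-- ===== SOURCE B (Python) =====
-- epoch = 1601069
--
-- # Cumulative days from the start of a 76-year Callippic cycle to the start of
-- # each year of the cycle (index = position in cycle, 0..75).
-- _PREFIX = [0, 354, 709, 1093, 1447, 1831, 2185, 2540, 2924, 3278, 3633, 4017,
--            4371, 4755, 5109, 5464, 5848, 6202, 6556, 6940, 7294, 7649, 8033,
--            8387, 8771, 9125, 9480, 9864, 10218, 10573, 10957, 11311, 11695,
--            12049, 12404, 12788, 13142, 13496, 13880, 14234, 14589, 14973,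
--            15327, 15711, 16065, 16420, 16804, 17158, 17513, 17897, 18251,
--            18635, 18989, 19344, 19728, 20082, 20436, 20820, 21174, 21529,
--            21913, 22267, 22651, 23005, 23360, 23744, 24098, 24453, 24837,
--            25191, 25575, 25929, 26284, 26668, 27022, 27376]
--
-- def nyd(year):
--     '''Compute the Julian Day on which a given year begins'''
--     year = int(year)
--     if year > 0:
--         year -= 1  # ancient Greeks did not recognise the number 0
--     return epoch + 27759 * (year // 76) + _PREFIX[year % 76]
-- ===== Notes on version B (the rewrite author's own statement) =====
-- stated objective: simpler
-- what changed: All four while loops and the per-year dict walk are replaced by a closed form: floor-divide the (no-year-zero-adjusted) year by the Callippic cycle length and look the remainder up in a precomputed per-cycle cumulative-day table.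
import Mathlib
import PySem

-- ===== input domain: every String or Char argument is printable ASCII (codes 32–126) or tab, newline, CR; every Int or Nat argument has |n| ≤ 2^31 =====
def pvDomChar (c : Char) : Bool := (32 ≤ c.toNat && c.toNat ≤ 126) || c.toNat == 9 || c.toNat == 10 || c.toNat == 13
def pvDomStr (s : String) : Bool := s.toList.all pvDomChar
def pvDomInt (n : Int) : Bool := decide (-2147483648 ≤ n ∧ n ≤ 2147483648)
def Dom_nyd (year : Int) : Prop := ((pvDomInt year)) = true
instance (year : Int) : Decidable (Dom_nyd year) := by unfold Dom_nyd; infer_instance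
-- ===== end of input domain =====

-- B replaces A's four while loops and per-year dict walk by a closed form:
-- floor-divide the adjusted year by the cycle length and look the remainder
-- up in a precomputed per-cycle cumulative-day table (objective: simpler).

-- ===== PORT A =====
def epochA : Int := 1601069

def yearLengthsDict : PySem.Dict Int Int :=
  PySem.Dict.ofList [(0,354),(1,355),(2,384),(3,354),(4,384),(5,354),(6,355),(7,384),(8,354),(9,355),
   (10,384),(11,354),(12,384),(13,354),(14,355),(15,384),(16,354),(17,354),(18,384)]

-- year_lengths[year % 19]: the key is always in 0..18, Python never raises; getD 0 is that lookup
def yl (year : Int) : Int :=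
  let year := if year > 0 then year - 1 else year
  if PySem.Int.mod year 76 == 74 then 354
  else PySem.Dict.getD yearLengthsDict (PySem.Int.mod year 19) 0

def nydLoop1 (year y n : Int) : Int × Int :=
  if y > year then nydLoop1 year (y - 76) (n - 27759) else (y, n)
termination_by (y - year).toNat
decreasing_by omega

def nydLoop2 (year y n : Int) : Int × Int :=
  if y + 76 ≤ year then nydLoop2 year (y + 76) (n + 27759) else (y, n)
termination_by (year - y).toNat
decreasing_by omega

def nydLoop3 (year y n : Int) : Int × Int :=
  if y + 19 ≤ year then nydLoop3 year (y + 19) (n + 6940) else (y, n)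
termination_by (year - y).toNat
decreasing_by omega

def nydLoop4 (year y n : Int) : Int × Int :=
  if y < year then
    if y < 0 then nydLoop4 year (y + 1) (n + yl y)
    else nydLoop4 year (y + 1) (n + yl (y + 1))
  else (y, n)
termination_by (year - y).toNat
decreasing_by all_goals omega

def nyd (year : Int) : Int :=
  let year := if year > 0 then year - 1 else year
  let y := 76 * (PySem.Int.floordiv year 76)
  let noumenia := epochA + 27759 * (PySem.Int.floordiv year 76)
  let p1 := nydLoop1 year y noumenia
  let p2 := nydLoop2 year p1.1 p1.2
  let p3 := nydLoop3 year p2.1 p2.2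
  let p4 := nydLoop4 year p3.1 p3.2
  p4.2

-- ===== PORT B =====
def epochB : Int := 1601069

def prefixTable : List Int :=
  [0, 354, 709, 1093, 1447, 1831, 2185, 2540, 2924, 3278, 3633, 4017,
   4371, 4755, 5109, 5464, 5848, 6202, 6556, 6940, 7294, 7649, 8033,
   8387, 8771, 9125, 9480, 9864, 10218, 10573, 10957, 11311, 11695,
   12049, 12404, 12788, 13142, 13496, 13880, 14234, 14589, 14973,
   15327, 15711, 16065, 16420, 16804, 17158, 17513, 17897, 18251,
   18635, 18989, 19344, 19728, 20082, 20436, 20820, 21174, 21529,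
   21913, 22267, 22651, 23005, 23360, 23744, 24098, 24453, 24837,
   25191, 25575, 25929, 26284, 26668, 27022, 27376]

-- _PREFIX[year % 76]: the index is always 0..75, so pyGet? is some; getD 0 is that indexing
def nyd_alt (year : Int) : Int :=
  let year := if year > 0 then year - 1 else year
  epochB + 27759 * (PySem.Int.floordiv year 76)
    + (PySem.List.pyGet? prefixTable (PySem.Int.mod year 76)).getD 0

-- ===== PRECONDITION & SPEC =====
def Spec_nyd (year : Int) (out : Int) : Prop := out = nyd_alt year
instance (year : Int) (out : Int) : Decidable (Spec_nyd year out) := by unfold Spec_nyd; infer_instance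

-- ===== CLAIM (what is proved, stated in full; the proofs are below) =====
def Claim_equal_nyd : Prop := ∀ (year : Int), Dom_nyd year → Spec_nyd year (nyd year)

-- ===== LEMMAS AND PROOFS =====

-- the value loop 4 adds in one iteration at position y (negative vs non-negative branch)
def lenAt (y : Int) : Int := if y < 0 then yl y else yl (y + 1)

-- sum of k consecutive per-year lengths starting at y
def psum (y : Int) : Nat → Int
  | 0 => 0
  | k + 1 => lenAt y + psum (y + 1) k

theorem lenAt_eq (y : Int) :
    lenAt y = (if y % 76 = 74 then (354 : Int)
               else PySem.Dict.getD yearLengthsDict (y % 19) 0) := by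
  unfold lenAt yl
  by_cases h : y < 0
  · simp only [if_pos h, if_neg (by omega : ¬ y > 0)]
    rw [PySem.Int.mod_eq_emod_of_pos (by norm_num), PySem.Int.mod_eq_emod_of_pos (by norm_num)]
    simp [beq_iff_eq]
  · simp only [if_neg h, if_pos (by omega : y + 1 > 0)]
    rw [show y + 1 - 1 = y by ring]
    rw [PySem.Int.mod_eq_emod_of_pos (by norm_num), PySem.Int.mod_eq_emod_of_pos (by norm_num)]
    simp [beq_iff_eq]

theorem lenAt_congr {y y' : Int} (h : y % 76 = y' % 76) : lenAt y = lenAt y' := by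
  rw [lenAt_eq, lenAt_eq, h,
    show y % 19 = y' % 19 by
      have h1 := Int.emod_emod_of_dvd y (by norm_num : (19:Int) ∣ 76)
      have h2 := Int.emod_emod_of_dvd y' (by norm_num : (19:Int) ∣ 76)
      rw [← h1, ← h2, h]]

theorem psum_congr (k : Nat) : ∀ {y y' : Int}, y % 76 = y' % 76 → psum y k = psum y' k := by
  induction k with
  | zero => intro y y' _; rfl
  | succ k ih =>
    intro y y' h
    simp only [psum, lenAt_congr h, ih (show (y + 1) % 76 = (y' + 1) % 76 by omega)]

theorem nydLoop1_noop (year y n : Int) (h : ¬ y > year) : nydLoop1 year y n = (y, n) := by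
  rw [nydLoop1]; simp [h]

theorem nydLoop2_noop (year y n : Int) (h : ¬ y + 76 ≤ year) : nydLoop2 year y n = (y, n) := by
  rw [nydLoop2]; simp [h]

theorem nydLoop3_char (year : Int) (m : Nat) :
    ∀ y n : Int, y + 19 * m ≤ year → year < y + 19 * m + 19 →
      nydLoop3 year y n = (y + 19 * m, n + 6940 * m) := by
  induction m with
  | zero =>
    intro y n h1 h2
    rw [nydLoop3]
    simp only [if_neg (show ¬ y + 19 ≤ year by push_cast at h2; omega)]
    push_cast; simp
  | succ m ih =>
    intro y n h1 h2
    rw [nydLoop3]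
    rw [if_pos (show y + 19 ≤ year by push_cast at h1; omega)]
    rw [ih (y + 19) (n + 6940) (by push_cast at h1 ⊢; omega) (by push_cast at h2 ⊢; omega)]
    simp only [Prod.mk.injEq]; push_cast; constructor <;> ring

theorem nydLoop4_char (year : Int) (k : Nat) :
    ∀ y n : Int, y + k = year → nydLoop4 year y n = (year, n + psum y k) := by
  induction k with
  | zero =>
    intro y n h
    rw [nydLoop4]
    simp only [if_neg (show ¬ y < year by omega)]
    simp [psum, show y = year by omega]
  | succ k ih =>
    intro y n h
    rw [nydLoop4]
    rw [if_pos (show y < year by push_cast at h; omega)]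
    by_cases hy : y < 0
    · rw [if_pos hy, ih (y + 1) (n + yl y) (by push_cast at h ⊢; omega)]
      simp only [psum, lenAt, if_pos hy]; ring_nf
    · rw [if_neg hy, ih (y + 1) (n + yl (y + 1)) (by push_cast at h ⊢; omega)]
      simp only [psum, lenAt, if_neg hy]; ring_nf

-- the closed-form table agrees with the loop sums on every cycle position
set_option maxRecDepth 100000 in
theorem table_key : ∀ s : Nat, s < 76 →
    (6940 : Int) * ((s / 19 : Nat) : Int) + psum ((19 * (s / 19) : Nat) : Int) (s % 19)
      = (PySem.List.pyGet? prefixTable ((s : Nat) : Int)).getD 0 := by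
  decide

-- ===== VERDICT (by name: the statement is the Claim_ definition above) =====
theorem nyd_spec : Claim_equal_nyd := by
  intro year _
  unfold Spec_nyd nyd nyd_alt
  set Y : Int := if year > 0 then year - 1 else year with hY
  have hqr : (PySem.Int.floordiv Y 76) * 76 + PySem.Int.mod Y 76 = Y :=
    PySem.Int.floordiv_mul_add_mod Y 76
  have hr0 : 0 ≤ PySem.Int.mod Y 76 := PySem.Int.mod_nonneg Y (by norm_num)
  have hr76 : PySem.Int.mod Y 76 < 76 := PySem.Int.mod_lt Y (by norm_num)
  set q : Int := PySem.Int.floordiv Y 76 with hq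
  set s : Nat := (PySem.Int.mod Y 76).toNat with hs
  have hsr : (s : Int) = PySem.Int.mod Y 76 := Int.toNat_of_nonneg hr0
  have hdm : 19 * (s / 19) + s % 19 = s := Nat.div_add_mod s 19
  have hm19 : s % 19 < 19 := Nat.mod_lt s (by norm_num)
  simp only []
  rw [nydLoop1_noop Y (76 * q) _ (by omega)]
  rw [nydLoop2_noop Y (76 * q) _ (by omega)]
  rw [nydLoop3_char Y (s / 19) (76 * q) _ (by push_cast; omega) (by push_cast; omega)]
  rw [nydLoop4_char Y (s % 19) _ _ (by push_cast; omega)]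
  rw [psum_congr (s % 19) (show (76 * q + 19 * ((s / 19 : Nat) : Int)) % 76
        = ((19 * (s / 19) : Nat) : Int) % 76 by push_cast; omega)]
  rw [← hsr, ← table_key s (by omega)]
  simp only [epochA, epochB]
  push_cast
  ring
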